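-- pv_equiv track=rewrite | github.com/nguyenngocdue/Library-Dynamo-Python-CSharp | ShowGeometry.py | flatten_to_minimum_level
-- ===== SOURCE A (Python) =====
-- def flatten_to_minimum_level(lst, level):
--     def flatten_helper(items, curr_level):
--         flattened = []
--         for item in items:
--             if curr_level < level and isinstance(item, list):
--                 flattened.extend(flatten_helper(item, curr_level + 1))
--             else:
--                 flattened.append(item)
--         return flattened
--
--     return flatten_helper(lst, 1)
-- ===== SOURCE B (Python) =====
-- def flatten_to_minimum_level(lst, level):
--     def go(items, depth):
--         if not items:
--             return []
--         head, rest = items[0], items[1:]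
--         if depth < level and isinstance(head, list):
--             return go(head, depth + 1) + go(rest, depth)
--         return [head] + go(rest, depth)
--     return go(lst, 1)
-- ===== Notes on version B (the rewrite author's own statement) =====
-- stated objective: alternative
-- what changed: Replaces A's for-loop helper that mutates a flattened accumulator with extend/append by a purely recursive head/tail decomposition that builds the result by list concatenation with no accumulator.
-- outside the precondition, e.g. on flatten_to_minimum_level([[1, 2]], 1): A returns [[1, 2]], B returns [[1, 2]]
import Mathlib
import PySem

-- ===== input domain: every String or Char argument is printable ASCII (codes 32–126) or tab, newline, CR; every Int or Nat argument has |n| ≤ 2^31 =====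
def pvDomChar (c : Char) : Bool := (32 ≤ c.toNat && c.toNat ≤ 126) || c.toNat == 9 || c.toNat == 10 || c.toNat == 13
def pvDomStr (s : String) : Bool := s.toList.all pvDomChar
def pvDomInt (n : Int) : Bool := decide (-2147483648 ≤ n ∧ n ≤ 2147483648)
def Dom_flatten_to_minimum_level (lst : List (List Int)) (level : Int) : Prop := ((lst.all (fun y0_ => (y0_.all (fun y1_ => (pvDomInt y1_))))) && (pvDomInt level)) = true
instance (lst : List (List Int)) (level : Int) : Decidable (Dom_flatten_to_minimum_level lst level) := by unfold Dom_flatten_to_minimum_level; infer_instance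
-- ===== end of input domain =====

-- B: purely recursive head/tail decomposition built by concatenation, instead of A's
-- for-loop helper mutating an accumulator; return values proved equal for level ≥ 2
-- (for level ≤ 1 both Pythons return the nested list itself, outside List Int).

-- ===== PORT A =====
-- Port of A's recursive helper at this type (depth-2 input). Inner call: items are
-- ints, isinstance(item, list) is false, so each item is appended to the accumulator.
def flatten_helper_inner (items : List Int) (curr_level level : Int) : List Int :=
  items.foldl (fun acc item => acc ++ [item]) []

def flatten_to_minimum_level (lst : List (List Int)) (level : Int) : List Int :=
  -- outer call with curr_level = 1: items are lists, so the branch tests 1 < level.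
  -- Else-branch: Python appends the sublist itself (not a List Int value); those
  -- inputs (level ≤ 1) are excluded by Pre_, `acc` stands in there.
  lst.foldl (fun acc item =>
    if (1 : Int) < level then acc ++ flatten_helper_inner item 2 level else acc) []

-- ===== PORT B =====
-- Source B's go on an inner (depth = 2) list: heads are ints, the isinstance branch is
-- never taken, so it returns [head] + go(rest).
def goB_inner : List Int → List Int
  | [] => []
  | h :: t => h :: goB_inner t

-- Source B's go on the outer (depth = 1) list: every head is a list, so the branch tests
-- 1 < level; its else-branch returns [head] + go(rest) with head a sublist (not a
-- List Int value) — those inputs (level ≤ 1) are excluded by Pre_, skipped here.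
def goB_outer (items : List (List Int)) (level : Int) : List Int :=
  match items with
  | [] => []
  | h :: t =>
    if (1 : Int) < level then goB_inner h ++ goB_outer t level else goB_outer t level

def flatten_to_minimum_level_alt (lst : List (List Int)) (level : Int) : List Int :=
  goB_outer lst level

-- ===== PRECONDITION & SPEC =====
-- Pre_ excludes level ≤ 1, where both Pythons return the nested list itself, which is
-- not a value of the declared List Int return type.
def Pre_flatten_to_minimum_level (lst : List (List Int)) (level : Int) : Prop := 2 ≤ level
instance (lst : List (List Int)) (level : Int) : Decidable (Pre_flatten_to_minimum_level lst level) := by unfold Pre_flatten_to_minimum_level; infer_instance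
def pvWitness_flatten_to_minimum_level : List (List Int) × Int := ([[1, 2], [3]], 2)
def Spec_flatten_to_minimum_level (lst : List (List Int)) (level : Int) (out : List Int) : Prop := out = flatten_to_minimum_level_alt lst level
instance (lst : List (List Int)) (level : Int) (out : List Int) : Decidable (Spec_flatten_to_minimum_level lst level out) := by unfold Spec_flatten_to_minimum_level; infer_instance

-- ===== CLAIM (what is proved, stated in full; the proofs are below) =====
def Claim_equal_flatten_to_minimum_level : Prop := ∀ (lst : List (List Int)) (level : Int), Dom_flatten_to_minimum_level lst level → Pre_flatten_to_minimum_level lst level → Spec_flatten_to_minimum_level lst level (flatten_to_minimum_level lst level)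

-- ===== LEMMAS AND PROOFS =====

theorem foldl_append_singleton (xs : List Int) (a : List Int) :
    xs.foldl (fun acc item => acc ++ [item]) a = a ++ xs := by
  induction xs generalizing a with
  | nil => simp
  | cons x xs ih => simp [List.foldl, ih]

theorem inner_id (item : List Int) (level : Int) :
    flatten_helper_inner item 2 level = item := by
  unfold flatten_helper_inner
  simpa using foldl_append_singleton item []

theorem portA_fold (lst : List (List Int)) (level : Int) (a : List Int)
    (h : (1 : Int) < level) :
    lst.foldl (fun acc item =>
      if (1 : Int) < level then acc ++ flatten_helper_inner item 2 level else acc) a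
      = a ++ lst.flatten := by
  induction lst generalizing a with
  | nil => simp
  | cons x xs ih =>
    simp [List.foldl, h, inner_id] at ih ⊢
    rw [ih]
    simp

theorem goB_inner_id (xs : List Int) : goB_inner xs = xs := by
  induction xs with
  | nil => rfl
  | cons h t ih => simp [goB_inner, ih]

theorem portB_flatten (lst : List (List Int)) (level : Int) (h : (1 : Int) < level) :
    goB_outer lst level = lst.flatten := by
  induction lst with
  | nil => rfl
  | cons x xs ih => simp [goB_outer, h, goB_inner_id, ih]

-- ===== VERDICT (by name: the statement is the Claim_ definition above) =====
theorem flatten_to_minimum_level_spec : Claim_equal_flatten_to_minimum_level := by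
  intro lst level _hdom hpre
  have h : (1 : Int) < level := by exact lt_of_lt_of_le one_lt_two hpre
  unfold Spec_flatten_to_minimum_level flatten_to_minimum_level flatten_to_minimum_level_alt
  rw [portA_fold lst level [] h, portB_flatten lst level h]
  simp
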